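-- pv_equiv track=rewrite | github.com/allegheny-college-cmpsc-100-spring-2026/assignment-activity-solution | src/activity_four/src/main.py | is_dbl
-- ===== SOURCE A (Python) =====
-- def is_dbl(word: str = "", limit: int = 1) -> bool:
--     """
--     Return True if a word contains a given number of
--     consecutively repeated word clusters, else False
--
--     :param word: Description
--     :type word: str
--     :param limit: Description
--     :type limit: int
--     :return: Description
--     :rtype: bool
--     """
--     # If there are no more words, bail immediately
--     if not word:
--         return False
--     # Setup our count for words with double letter clusters
--     num_of_dbls = 0
--     prev, next = None, None
--     # Iterate through each word one letter at a time
--     for letter in word: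
--         # Inch down the word letter by letter
--         prev = letter
--         if prev == next:
--             # Add one if the previous and next letter are the same
--             num_of_dbls +=1
--         next = letter
--     # Return the boolean outcome of our trial
--     return num_of_dbls == limit
-- ===== SOURCE B (Python) =====
-- def is_dbl(word: str = "", limit: int = 1) -> bool:
--     if not word:
--         return False
--     pairs = 0
--     i = 0
--     n = len(word)
--     while i < n:
--         j = i
--         while j < n and word[j] == word[i]:
--             j += 1
--         pairs += (j - i) - 1
--         i = j
--     return pairs == limit
-- ===== Notes on version B (the rewrite author's own statement) =====
-- stated objective: alternative
-- what changed: Replaced the prev/next sliding-pointer letter loop with a run-length scan: an outer loop jumps over maximal runs of identical characters and adds (run length - 1) per run.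
import Mathlib
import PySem

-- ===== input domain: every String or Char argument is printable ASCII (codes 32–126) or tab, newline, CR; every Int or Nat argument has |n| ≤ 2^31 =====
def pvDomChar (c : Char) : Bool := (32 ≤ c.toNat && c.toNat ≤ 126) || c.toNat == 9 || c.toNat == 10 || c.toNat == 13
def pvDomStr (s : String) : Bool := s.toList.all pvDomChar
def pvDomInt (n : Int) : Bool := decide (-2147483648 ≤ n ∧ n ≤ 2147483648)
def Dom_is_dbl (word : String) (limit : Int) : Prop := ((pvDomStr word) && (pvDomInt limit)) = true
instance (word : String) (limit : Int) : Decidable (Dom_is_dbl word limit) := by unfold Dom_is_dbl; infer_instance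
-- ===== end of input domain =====

-- B replaces A's prev/next letter-by-letter pass by a run-length scan over maximal runs
-- of identical characters (objective: alternative); same return value, same cost.

-- ===== PORT A =====
-- state: (num_of_dbls, prev, next); each iteration sets prev := letter, bumps the count
-- when prev == next, then sets next := letter — exactly A's loop.
def is_dbl (word : String) (limit : Int) : Bool :=
  if word.toList = [] then false
  else
    let st := word.toList.foldl
      (fun (st : Int × Option Char × Option Char) letter =>
        let prev : Option Char := some letter
        let n := if prev = st.2.2 then st.1 + 1 else st.1
        (n, prev, some letter))
      (0, none, none)
    st.1 == limit

-- ===== PORT B =====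
-- outer while loop of Source B: consume one maximal run per step, add (run length - 1);
-- takeWhile/dropWhile on the tail are the inner `while j < n and word[j] == word[i]` scan.
def altPairs : List Char → Int
  | [] => 0
  | c :: rest =>
    ((rest.takeWhile (fun x => x = c)).length : Int)
      + altPairs (rest.dropWhile (fun x => x = c))
  termination_by l => l.length
  decreasing_by
    simpa using Nat.lt_succ_of_le (List.length_dropWhile_le _ rest)

def is_dbl_alt (word : String) (limit : Int) : Bool :=
  if word.toList = [] then false
  else altPairs word.toList == limit

-- ===== PRECONDITION & SPEC =====
def Spec_is_dbl (word : String) (limit : Int) (out : Bool) : Prop := out = is_dbl_alt word limit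
instance (word : String) (limit : Int) (out : Bool) : Decidable (Spec_is_dbl word limit out) := by unfold Spec_is_dbl; infer_instance

-- ===== CLAIM (what is proved, stated in full; the proofs are below) =====
def Claim_equal_is_dbl : Prop := ∀ (word : String) (limit : Int), Dom_is_dbl word limit → Spec_is_dbl word limit (is_dbl word limit)

-- ===== LEMMAS AND PROOFS =====

-- reference count: number of adjacent equal pairs
def pairsAdj : List Char → Int
  | [] => 0
  | [_] => 0
  | a :: b :: rest => (if a = b then 1 else 0) + pairsAdj (b :: rest)

-- A's foldl with accumulator (n, _, some c) adds pairsAdj (c :: l) to n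
theorem foldA_eq (l : List Char) : ∀ (n : Int) (p : Option Char) (c : Char),
    (l.foldl
      (fun (st : Int × Option Char × Option Char) letter =>
        let prev : Option Char := some letter
        let m := if prev = st.2.2 then st.1 + 1 else st.1
        (m, prev, some letter))
      (n, p, some c)).1 = n + pairsAdj (c :: l) := by
  induction l with
  | nil => intro n p c; simp [pairsAdj]
  | cons x xs ih =>
    intro n p c
    by_cases h : x = c
    · simp [List.foldl, h, ih, pairsAdj]; ring
    · simp [List.foldl, h, Ne.symm h, ih, pairsAdj]

theorem altPairs_cons (c : Char) (l : List Char) :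
    altPairs (c :: l) = pairsAdj (c :: l) := by
  induction l generalizing c with
  | nil => simp [altPairs.eq_def, pairsAdj]
  | cons x xs ih =>
    by_cases h : x = c
    · subst h
      rw [altPairs.eq_def]
      simp only [List.takeWhile, List.dropWhile, decide_true]
      have : altPairs (x :: xs)
          = ((xs.takeWhile (fun y => y = x)).length : Int)
            + altPairs (xs.dropWhile (fun y => y = x)) := by rw [altPairs.eq_def]
      simp [pairsAdj, ← ih x, this]; ring
    · rw [altPairs.eq_def]
      simp only [List.takeWhile, List.dropWhile, h]
      simp [pairsAdj, Ne.symm h, ih x]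

-- ===== VERDICT (by name: the statement is the Claim_ definition above) =====
theorem is_dbl_spec : Claim_equal_is_dbl := by
  intro word limit _
  unfold Spec_is_dbl is_dbl is_dbl_alt
  cases h : word.toList with
  | nil => simp
  | cons c l =>
    simp only [List.foldl, if_neg (List.cons_ne_nil c l)]
    rw [altPairs_cons]
    have := foldA_eq l 0 (some c) c
    simp at this
    simp [this]
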